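-- pv_equiv track=rewrite | github.com/JoJoAtkinson/pentaryn | scripts/pandoc-export.py | _apply_pdf_defaults
-- ===== SOURCE A (Python) =====
-- def _apply_pdf_defaults(pandoc_args: list[str]) -> list[str]:
--     """
--     Apply the same Pandoc options used by the VSCode task (if they aren't already present).
--     """
--     updated = list(pandoc_args)
--
--     def has_flag(*flags: str) -> bool:
--         return any(a in flags for a in updated)
--
--     def has_prefix(prefix: str) -> bool:
--         return any(a.startswith(prefix) for a in updated)
--
--     if not has_flag("--toc"):
--         updated.append("--toc")
--     if not has_prefix("--toc-depth"):
--         updated.append("--toc-depth=2")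
--     if not has_prefix("--pdf-engine"):
--         updated.append("--pdf-engine=xelatex")
--
--     # Variables (keep simple; don't try to dedupe pairs aggressively).
--     vars_defaults = [
--         ("mainfont", "Baskerville"),
--         ("linestretch", "1.3"),
--         ("classoption", "twocolumn"),
--         ("geometry:margin", "0.7in"),
--     ]
--     existing_vars = set()
--     for idx, arg in enumerate(updated):
--         if arg == "-V" and idx + 1 < len(updated):
--             existing_vars.add(updated[idx + 1].split("=", 1)[0])
--         elif arg.startswith("-V") and len(arg) > 2:
--             existing_vars.add(arg[2:].split("=", 1)[0])
--
--     for key, value in vars_defaults: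
--         if key in existing_vars:
--             continue
--         updated.extend(["-V", f"{key}={value}"])
--
--     return updated
-- ===== SOURCE B (Python) =====
-- def _apply_pdf_defaults(pandoc_args: list[str]) -> list[str]:
--     """Single-pass re-implementation: gather all flags and -V keys in one scan, then append."""
--     has_toc = has_toc_depth = has_engine = False
--     keys = set()
--     prev_is_v = False
--     for arg in pandoc_args:
--         if prev_is_v:
--             keys.add(arg.split("=", 1)[0])
--         if arg == "--toc":
--             has_toc = True
--         if arg.startswith("--toc-depth"):
--             has_toc_depth = True
--         if arg.startswith("--pdf-engine"):
--             has_engine = True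
--         if arg.startswith("-V") and len(arg) > 2:
--             keys.add(arg[2:].split("=", 1)[0])
--         prev_is_v = arg == "-V"
--     out = list(pandoc_args)
--     if not has_toc:
--         out.append("--toc")
--     if not has_toc_depth:
--         out.append("--toc-depth=2")
--     if not has_engine:
--         out.append("--pdf-engine=xelatex")
--     for key, value in [("mainfont", "Baskerville"), ("linestretch", "1.3"),
--                        ("classoption", "twocolumn"), ("geometry:margin", "0.7in")]:
--         if key not in keys:
--             out.extend(["-V", f"{key}={value}"])
--     return out
-- ===== Notes on version B (the rewrite author's own statement) =====
-- stated objective: alternative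
-- what changed: Replaces A's four separate scans (membership, two prefix scans, and an enumerate-with-lookahead scan over the already-extended list) by one single pass over the original arguments that gathers all flags and -V keys at once, then appends the missing defaults.
import Mathlib
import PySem

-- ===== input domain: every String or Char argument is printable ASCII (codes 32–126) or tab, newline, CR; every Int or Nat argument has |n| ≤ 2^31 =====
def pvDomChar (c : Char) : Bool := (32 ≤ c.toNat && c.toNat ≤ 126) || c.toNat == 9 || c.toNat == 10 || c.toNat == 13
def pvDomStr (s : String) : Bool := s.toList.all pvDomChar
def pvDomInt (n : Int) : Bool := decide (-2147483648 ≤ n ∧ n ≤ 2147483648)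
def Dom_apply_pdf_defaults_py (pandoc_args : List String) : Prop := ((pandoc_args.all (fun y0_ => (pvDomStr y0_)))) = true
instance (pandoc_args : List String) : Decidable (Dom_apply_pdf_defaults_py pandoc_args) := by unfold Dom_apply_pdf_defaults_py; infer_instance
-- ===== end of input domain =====

-- B replaces A's four separate scans by one single pass that gathers all flags and -V keys at once; same O(n) cost, different decomposition.


-- shared helper: s.split("=", 1)[0] is exactly the prefix of s before the first '=' (whole s if none)
def pvKeyOf (s : String) : String := String.ofList (s.toList.takeWhile (fun c => c ≠ '='))

def pvDefaults : List (String × String) :=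
  [("mainfont", "Baskerville"), ("linestretch", "1.3"),
   ("classoption", "twocolumn"), ("geometry:margin", "0.7in")]

-- ===== PORT A =====
-- body of A's 'for idx, arg in enumerate(updated)' loop: 'idx + 1 < len(updated)' ≡ the rest of the
-- list is nonempty, and 'updated[idx + 1]' is its head; 'arg[2:]' = drop 2 (exact, index nonnegative)
def pvStepA (a : String) (rest : List String) (s : PySem.Set String) : PySem.Set String :=
  if a = "-V" then
    match rest with
    | b :: _ => PySem.Set.add s (pvKeyOf b)
    | [] => s
  else if PySem.Str.startswith a "-V" = true ∧ 2 < a.toList.length then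
    PySem.Set.add s (pvKeyOf (String.ofList (a.toList.drop 2)))
  else s

def pvScanA : List String → PySem.Set String → PySem.Set String
  | [], s => s
  | a :: rest, s => pvScanA rest (pvStepA a rest s)

def apply_pdf_defaults_py (pandoc_args : List String) : List String :=
  let u0 := pandoc_args
  let u1 := if !(u0.any (fun a => a == "--toc")) then u0 ++ ["--toc"] else u0
  let u2 := if !(u1.any (fun a => PySem.Str.startswith a "--toc-depth")) then u1 ++ ["--toc-depth=2"] else u1
  let u3 := if !(u2.any (fun a => PySem.Str.startswith a "--pdf-engine")) then u2 ++ ["--pdf-engine=xelatex"] else u2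
  let existing_vars := pvScanA u3 PySem.Set.empty
  pvDefaults.foldl
    (fun acc kv => if PySem.Set.contains existing_vars kv.1 then acc else acc ++ ["-V", kv.1 ++ "=" ++ kv.2])
    u3

-- ===== PORT B =====
-- B's single-pass loop body; state = (has_toc, has_toc_depth, has_engine, prev_is_v, keys)
def pvStepB (st : Bool × Bool × Bool × Bool × PySem.Set String) (a : String) :
    Bool × Bool × Bool × Bool × PySem.Set String :=
  let keys := if st.2.2.2.1 then PySem.Set.add st.2.2.2.2 (pvKeyOf a) else st.2.2.2.2
  let keys := if PySem.Str.startswith a "-V" = true ∧ 2 < a.toList.length then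
                PySem.Set.add keys (pvKeyOf (String.ofList (a.toList.drop 2)))
              else keys
  (st.1 || (a == "--toc"),
   st.2.1 || PySem.Str.startswith a "--toc-depth",
   st.2.2.1 || PySem.Str.startswith a "--pdf-engine",
   a == "-V", keys)

def apply_pdf_defaults_py_alt (pandoc_args : List String) : List String :=
  let st := pandoc_args.foldl pvStepB (false, false, false, false, PySem.Set.empty)
  let out := pandoc_args
  let out := if !st.1 then out ++ ["--toc"] else out
  let out := if !st.2.1 then out ++ ["--toc-depth=2"] else out
  let out := if !st.2.2.1 then out ++ ["--pdf-engine=xelatex"] else out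
  pvDefaults.foldl
    (fun acc kv => if PySem.Set.contains st.2.2.2.2 kv.1 then acc else acc ++ ["-V", kv.1 ++ "=" ++ kv.2])
    out

-- ===== PRECONDITION & SPEC =====
def Spec_apply_pdf_defaults_py (pandoc_args : List String) (out : List String) : Prop := out = apply_pdf_defaults_py_alt pandoc_args
instance (pandoc_args : List String) (out : List String) : Decidable (Spec_apply_pdf_defaults_py pandoc_args out) := by unfold Spec_apply_pdf_defaults_py; infer_instance

-- ===== CLAIM (what is proved, stated in full; the proofs are below) =====
def Claim_equal_apply_pdf_defaults_py : Prop := ∀ (pandoc_args : List String), Dom_apply_pdf_defaults_py pandoc_args → Spec_apply_pdf_defaults_py pandoc_args (apply_pdf_defaults_py pandoc_args)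

-- ===== LEMMAS AND PROOFS =====

-- the keys A's scan step would add (proof-side mirror of pvStepA)
def pvAdd1 (a : String) (rest : List String) : List String :=
  if a = "-V" then
    match rest with
    | b :: _ => [pvKeyOf b]
    | [] => []
  else if PySem.Str.startswith a "-V" = true ∧ 2 < a.toList.length then
    [pvKeyOf (String.ofList (a.toList.drop 2))]
  else []

def pvAdds : List String → List String
  | [] => []
  | a :: rest => pvAdd1 a rest ++ pvAdds rest

theorem mem_pvStepA (a : String) (rest : List String) (s : PySem.Set String) (k : String) :
    k ∈ pvStepA a rest s ↔ k ∈ s ∨ k ∈ pvAdd1 a rest := by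
  unfold pvStepA pvAdd1
  by_cases ha : a = "-V"
  · simp only [if_pos ha]
    cases rest with
    | nil => simp
    | cons b t => simp [PySem.Set.mem_add]
  · simp only [if_neg ha]
    by_cases hp : PySem.Str.startswith a "-V" = true ∧ 2 < a.toList.length
    · simp only [if_pos hp]
      simp [PySem.Set.mem_add]
    · simp only [if_neg hp]
      simp

theorem mem_pvScanA (l : List String) (s : PySem.Set String) (k : String) :
    k ∈ pvScanA l s ↔ k ∈ s ∨ k ∈ pvAdds l := by
  induction l generalizing s with
  | nil => simp [pvScanA, pvAdds]
  | cons a rest ih =>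
      show k ∈ pvScanA rest (pvStepA a rest s) ↔ _
      rw [ih, mem_pvStepA]
      simp [pvAdds]
      tauto

theorem notStart_ne (a : String) (h : PySem.Str.startswith a "-V" = false) : a ≠ "-V" := by
  intro he; subst he; exact absurd h (by decide)

theorem pvStepB_keys (l : List String) (t d p : Bool) (pv : Bool) (s : PySem.Set String) :
    (l.foldl pvStepB (t, d, p, pv, s)).2.2.2.2
      = pvScanA ((if pv then ["-V"] else []) ++ l) s := by
  induction l generalizing t d p pv s with
  | nil => cases pv <;> simp [pvScanA, pvStepA]
  | cons a rest ih =>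
      simp only [List.foldl_cons, pvStepB]
      rw [ih]
      cases pv with
      | false =>
          simp only [Bool.false_eq_true]
          show pvScanA ((if (a == "-V") = true then ["-V"] else []) ++ rest) _ = pvScanA (a :: rest) s
          by_cases ha : a = "-V"
          · have h2 : ¬ (PySem.Str.startswith a "-V" = true ∧ 2 < a.toList.length) := by
              subst ha; decide
            subst ha
            simp only [if_neg h2, beq_self_eq_true]
            show pvScanA ("-V" :: rest) s = _
            cases rest <;> rfl
          · have hb : (a == "-V") = false := by simp [ha]
            simp only [hb, Bool.false_eq_true]
            show pvScanA rest _ = pvScanA rest (pvStepA a rest s)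
            unfold pvStepA
            simp [ha]
      | true =>
          show pvScanA ((if (a == "-V") = true then ["-V"] else []) ++ rest) _
              = pvScanA ("-V" :: a :: rest) s
          have hrhs : pvScanA ("-V" :: a :: rest) s
              = pvScanA (a :: rest) (PySem.Set.add s (pvKeyOf a)) := rfl
          rw [hrhs]
          by_cases ha : a = "-V"
          · have h2 : ¬ (PySem.Str.startswith a "-V" = true ∧ 2 < a.toList.length) := by
              subst ha; decide
            subst ha
            simp only [if_neg h2, beq_self_eq_true]
            show pvScanA ("-V" :: rest) _ = _
            cases rest <;> rfl
          · have hb : (a == "-V") = false := by simp [ha]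
            simp only [hb, Bool.false_eq_true]
            show pvScanA rest _ = pvScanA rest (pvStepA a rest _)
            unfold pvStepA
            simp [ha]

theorem pvStepB_flags (l : List String) (t d p pv : Bool) (s : PySem.Set String) :
    (l.foldl pvStepB (t, d, p, pv, s)).1 = (t || l.any (fun a => a == "--toc"))
    ∧ (l.foldl pvStepB (t, d, p, pv, s)).2.1 = (d || l.any (fun a => PySem.Str.startswith a "--toc-depth"))
    ∧ (l.foldl pvStepB (t, d, p, pv, s)).2.2.1 = (p || l.any (fun a => PySem.Str.startswith a "--pdf-engine")) := by
  induction l generalizing t d p pv s with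
  | nil => simp
  | cons a rest ih =>
      simp only [List.foldl_cons, pvStepB, List.any_cons]
      exact ⟨by rw [(ih _ _ _ _ _).1, Bool.or_assoc],
             by rw [(ih _ _ _ _ _).2.1, Bool.or_assoc],
             by rw [(ih _ _ _ _ _).2.2, Bool.or_assoc]⟩

theorem pvAdds_safe (suf : List String)
    (hs : ∀ x ∈ suf, PySem.Str.startswith x "-V" = false) : pvAdds suf = [] := by
  induction suf with
  | nil => rfl
  | cons x t ih =>
      have hx := hs x (by simp)
      have hne := notStart_ne x hx
      have h2 : ¬ (PySem.Str.startswith x "-V" = true ∧ 2 < x.toList.length) := by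
        rintro ⟨h, -⟩; rw [hx] at h; exact Bool.false_ne_true h
      show pvAdd1 x t ++ pvAdds t = []
      rw [ih (fun y hy => hs y (by simp [hy]))]
      unfold pvAdd1
      rw [if_neg hne, if_neg h2]
      rfl

theorem pvAdds_append_safe (l suf : List String)
    (hs : ∀ x ∈ suf, PySem.Str.startswith x "-V" = false) (k : String)
    (hk : ∀ x ∈ suf, k ≠ pvKeyOf x) :
    (k ∈ pvAdds (l ++ suf) ↔ k ∈ pvAdds l) := by
  induction l with
  | nil => simp [pvAdds, pvAdds_safe suf hs]
  | cons a rest ih =>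
      show k ∈ pvAdd1 a (rest ++ suf) ++ pvAdds (rest ++ suf) ↔ k ∈ pvAdd1 a rest ++ pvAdds rest
      have h1 : k ∈ pvAdd1 a (rest ++ suf) ↔ k ∈ pvAdd1 a rest := by
        unfold pvAdd1
        by_cases ha : a = "-V"
        · simp only [if_pos ha]
          cases rest with
          | cons b t => simp
          | nil =>
              cases suf with
              | nil => simp
              | cons b t =>
                  simp only [List.nil_append]
                  have : k ≠ pvKeyOf b := hk b (by simp)
                  simp [this]
        · simp only [if_neg ha]
      simp only [List.mem_append, h1, ih]

theorem any_append_single_false (l : List String) (p : String → Bool) (x : String)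
    (hx : p x = false) : (l ++ [x]).any p = l.any p := by
  simp [List.any_append, hx]

theorem any_stage2 (l : List String) (c : Prop) [Decidable c] :
    (if c then l ++ ["--toc"] else l).any (fun a => PySem.Str.startswith a "--toc-depth")
      = l.any (fun a => PySem.Str.startswith a "--toc-depth") := by
  split_ifs
  · exact any_append_single_false _ _ _ (by decide)
  · rfl

theorem any_stage3 (l : List String) (c1 c2 : Prop) [Decidable c1] [Decidable c2] :
    (if c2 then (if c1 then l ++ ["--toc"] else l) ++ ["--toc-depth=2"]
     else (if c1 then l ++ ["--toc"] else l)).any (fun a => PySem.Str.startswith a "--pdf-engine")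
      = l.any (fun a => PySem.Str.startswith a "--pdf-engine") := by
  split_ifs <;>
    simp only [any_append_single_false _ (fun a => PySem.Str.startswith a "--pdf-engine") "--toc" (by decide),
      any_append_single_false _ (fun a => PySem.Str.startswith a "--pdf-engine") "--toc-depth=2" (by decide)]

theorem chain_split (l : List String) (c1 c2 c3 : Prop) [Decidable c1] [Decidable c2] [Decidable c3]
    (x1 x2 x3 : String) :
    (if c3 then (if c2 then (if c1 then l ++ [x1] else l) ++ [x2] else (if c1 then l ++ [x1] else l)) ++ [x3]
     else (if c2 then (if c1 then l ++ [x1] else l) ++ [x2] else (if c1 then l ++ [x1] else l)))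
    = l ++ ((if c1 then [x1] else []) ++ (if c2 then [x2] else []) ++ (if c3 then [x3] else [])) := by
  split_ifs <;> simp

theorem fold_eq (l suf : List String)
    (hmem : ∀ x ∈ suf, x = "--toc" ∨ x = "--toc-depth=2" ∨ x = "--pdf-engine=xelatex") (init : List String) :
    pvDefaults.foldl
      (fun acc kv => if PySem.Set.contains (pvScanA (l ++ suf) PySem.Set.empty) kv.1 then acc
                     else acc ++ ["-V", kv.1 ++ "=" ++ kv.2]) init
    = pvDefaults.foldl
      (fun acc kv => if PySem.Set.contains (pvScanA l PySem.Set.empty) kv.1 then acc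
                     else acc ++ ["-V", kv.1 ++ "=" ++ kv.2]) init := by
  have hsafe : ∀ x ∈ suf, PySem.Str.startswith x "-V" = false := by
    intro x hx
    rcases hmem x hx with h | h | h <;> subst h <;> decide
  have hck : ∀ k : String, (∀ x ∈ suf, k ≠ pvKeyOf x) →
      PySem.Set.contains (pvScanA (l ++ suf) PySem.Set.empty) k
        = PySem.Set.contains (pvScanA l PySem.Set.empty) k := by
    intro k hk
    rw [Bool.eq_iff_iff, PySem.Set.contains_iff, PySem.Set.contains_iff, mem_pvScanA, mem_pvScanA,
      pvAdds_append_safe l suf hsafe k hk]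
  have hknot : ∀ k : String, k = "mainfont" ∨ k = "linestretch" ∨ k = "classoption" ∨ k = "geometry:margin" →
      ∀ x ∈ suf, k ≠ pvKeyOf x := by
    intro k hkk x hx
    rcases hmem x hx with h | h | h <;> subst h <;>
      rcases hkk with h | h | h | h <;> subst h <;> decide
  have hm1 := hck "mainfont" (hknot _ (Or.inl rfl))
  have hm2 := hck "linestretch" (hknot _ (Or.inr (Or.inl rfl)))
  have hm3 := hck "classoption" (hknot _ (Or.inr (Or.inr (Or.inl rfl))))
  have hm4 := hck "geometry:margin" (hknot _ (Or.inr (Or.inr (Or.inr rfl))))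
  simp only [pvDefaults, List.foldl_cons, List.foldl_nil]
  rw [hm1, hm2, hm3, hm4]

theorem apply_pdf_defaults_py_spec : Claim_equal_apply_pdf_defaults_py := by
  unfold Claim_equal_apply_pdf_defaults_py
  intro l _
  simp only [Spec_apply_pdf_defaults_py, apply_pdf_defaults_py, apply_pdf_defaults_py_alt]
  have hfl := pvStepB_flags l false false false false PySem.Set.empty
  have hkeys := pvStepB_keys l false false false false PySem.Set.empty
  simp only [Bool.false_or] at hfl
  simp only [if_neg Bool.false_ne_true, List.nil_append] at hkeys
  rw [hfl.1, hfl.2.1, hfl.2.2, hkeys]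
  rw [any_stage2 l, any_stage3 l]
  rw [chain_split l _ _ _ "--toc" "--toc-depth=2" "--pdf-engine=xelatex"]
  refine fold_eq l _ ?_ _
  intro x hx
  simp only [List.mem_append] at hx
  rcases hx with (h | h) | h <;> split_ifs at h <;> simp at h <;> tauto
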